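-- pv_equiv track=rewrite | github.com/Jesus-ggez/tc-ui | main.py | get_first_alnum_word
-- ===== SOURCE A (Python) =====
-- def get_first_alnum_word(s: str) -> str:
--     new_word: str = ''
--
--     for char in s:
--         if char.isalnum() or char == '_':
--             new_word += char
--             continue
--
--         if new_word:
--             break
--
--     return new_word
-- ===== SOURCE B (Python) =====
-- def get_first_alnum_word(s: str) -> str:
--     def is_word(c: str) -> bool:
--         return c.isalnum() or c == '_'
--
--     n = len(s)
--
--     # Phase 1: skip past the leading run of separator characters.
--     i = 0
--     while i < n and not is_word(s[i]):
--         i += 1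
--
--     # Phase 2: advance past the maximal run of word characters.
--     j = i
--     while j < n and is_word(s[j]):
--         j += 1
--
--     return s[i:j]
-- ===== Notes on version B (the rewrite author's own statement) =====
-- stated objective: alternative
-- what changed: Replaces A's single accumulate-and-break string-building loop (with its implicit 'started a word' flag read off the accumulator) by a two-pointer scan: one index loop skips the leading separators, a second advances past the word run, and the answer is a single slice s[i:j].
import Mathlib
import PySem

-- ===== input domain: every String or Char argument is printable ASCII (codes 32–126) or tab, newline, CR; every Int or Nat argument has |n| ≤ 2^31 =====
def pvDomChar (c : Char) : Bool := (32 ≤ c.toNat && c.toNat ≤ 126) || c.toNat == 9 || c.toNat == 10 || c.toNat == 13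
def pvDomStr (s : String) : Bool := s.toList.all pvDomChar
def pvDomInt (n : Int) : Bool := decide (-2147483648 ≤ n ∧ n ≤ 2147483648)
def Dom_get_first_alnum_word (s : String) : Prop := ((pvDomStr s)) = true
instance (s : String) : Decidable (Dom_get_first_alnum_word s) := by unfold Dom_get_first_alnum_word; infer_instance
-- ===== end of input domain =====

-- B replaces A's single accumulate-and-break string-building loop by a two-pointer index scan
-- (skip separators, advance past the word run, return one slice s[i:j]); same O(n) cost.

-- ===== PORT A =====
-- char.isalnum() or char == '_'
def pyIsWordChar (c : Char) : Bool := PySem.Chars.isalnum c || c == '_'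

-- A's loop: state is the accumulator new_word; 'if new_word: break' returns it.
def aLoop (cs : List Char) (new_word : List Char) : List Char :=
  match cs with
  | [] => new_word
  | c :: rest =>
    if pyIsWordChar c then aLoop rest (new_word ++ [c])
    else if new_word.isEmpty then aLoop rest new_word
    else new_word

def get_first_alnum_word (s : String) : String := String.ofList (aLoop s.toList [])

-- ===== PORT B =====
-- B's first while loop: i advances while s[i] is a separator.
def bSkipIdx (cs : List Char) (i : Nat) : Nat :=
  if h : i < cs.length then
    if ¬ pyIsWordChar cs[i] then bSkipIdx cs (i + 1) else i
  else i
termination_by cs.length - i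

-- B's second while loop: j advances while s[j] is a word character.
def bTakeIdx (cs : List Char) (j : Nat) : Nat :=
  if h : j < cs.length then
    if pyIsWordChar cs[j] then bTakeIdx cs (j + 1) else j
  else j
termination_by cs.length - j

def get_first_alnum_word_alt (s : String) : String :=
  let cs := s.toList
  let i := bSkipIdx cs 0
  let j := bTakeIdx cs i
  String.ofList (PySem.List.slice cs (some (i : Int)) (some (j : Int)))

-- ===== PRECONDITION & SPEC =====
def Spec_get_first_alnum_word (s : String) (out : String) : Prop := out = get_first_alnum_word_alt s
instance (s : String) (out : String) : Decidable (Spec_get_first_alnum_word s out) := by unfold Spec_get_first_alnum_word; infer_instance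

-- ===== CLAIM (what is proved, stated in full; the proofs are below) =====
def Claim_equal_get_first_alnum_word : Prop := ∀ (s : String), Dom_get_first_alnum_word s → Spec_get_first_alnum_word s (get_first_alnum_word s)

-- ===== LEMMAS AND PROOFS =====

-- B's skip loop lands after the leading run of separators.
theorem bSkipIdx_spec (cs : List Char) (i : Nat) :
    bSkipIdx cs i = i + ((cs.drop i).takeWhile (fun c => !pyIsWordChar c)).length := by
  by_cases h : i < cs.length
  · by_cases hw : pyIsWordChar cs[i] = true
    · rw [bSkipIdx, dif_pos h, if_neg (by simp [hw])]
      have hlen : ((cs.drop i).takeWhile (fun c => !pyIsWordChar c)).length = 0 := by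
        rw [List.drop_eq_getElem_cons h, List.takeWhile_cons]
        simp [hw]
      omega
    · have hw' : pyIsWordChar cs[i] = false := by simpa using hw
      rw [bSkipIdx, dif_pos h, if_pos (by simp [hw']), bSkipIdx_spec cs (i + 1)]
      have hlen : ((cs.drop i).takeWhile (fun c => !pyIsWordChar c)).length
          = ((cs.drop (i + 1)).takeWhile (fun c => !pyIsWordChar c)).length + 1 := by
        rw [List.drop_eq_getElem_cons h, List.takeWhile_cons]
        simp [hw']
      omega
  · rw [bSkipIdx, dif_neg h]
    simp [List.drop_eq_nil_of_le (by omega : cs.length ≤ i)]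
termination_by cs.length - i

-- B's take loop lands after the word run.
theorem bTakeIdx_spec (cs : List Char) (j : Nat) :
    bTakeIdx cs j = j + ((cs.drop j).takeWhile pyIsWordChar).length := by
  by_cases h : j < cs.length
  · by_cases hw : pyIsWordChar cs[j] = true
    · rw [bTakeIdx, dif_pos h, if_pos hw, bTakeIdx_spec cs (j + 1)]
      have hlen : ((cs.drop j).takeWhile pyIsWordChar).length
          = ((cs.drop (j + 1)).takeWhile pyIsWordChar).length + 1 := by
        rw [List.drop_eq_getElem_cons h, List.takeWhile_cons]
        simp [hw]
      omega
    · rw [bTakeIdx, dif_pos h, if_neg hw]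
      have hlen : ((cs.drop j).takeWhile pyIsWordChar).length = 0 := by
        rw [List.drop_eq_getElem_cons h, List.takeWhile_cons]
        simp [Bool.not_eq_true] at hw
        simp [hw]
      omega
  · rw [bTakeIdx, dif_neg h]
    simp [List.drop_eq_nil_of_le (by omega : cs.length ≤ j)]
termination_by cs.length - j

-- A's loop, once the accumulator is nonempty, appends the leading word run.
theorem aLoop_ne (cs : List Char) :
    ∀ a : List Char, a ≠ [] → aLoop cs a = a ++ cs.takeWhile pyIsWordChar := by
  induction cs with
  | nil => intro a _; simp [aLoop]
  | cons c rest ih =>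
    intro a ha
    by_cases h : pyIsWordChar c = true
    · simp [aLoop, h, ih (a ++ [c]) (by simp)]
    · simp [aLoop, h, List.isEmpty_iff, ha]

-- A computes takeWhile-after-dropWhile.
theorem aLoop_nil (cs : List Char) :
    aLoop cs [] = (cs.dropWhile (fun c => !pyIsWordChar c)).takeWhile pyIsWordChar := by
  induction cs with
  | nil => rfl
  | cons c rest ih =>
    by_cases h : pyIsWordChar c = true
    · simp [aLoop, h, aLoop_ne rest [c] (by simp)]
    · simpa [aLoop, h, List.dropWhile_cons] using ih

theorem drop_takeWhile_length (p : Char → Bool) (cs : List Char) :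
    cs.drop ((cs.takeWhile p).length) = cs.dropWhile p := by
  induction cs with
  | nil => simp
  | cons c rest ih =>
    by_cases h : p c = true <;>
      simp [h, ih]

theorem take_takeWhile_length (p : Char → Bool) (cs : List Char) :
    cs.take ((cs.takeWhile p).length) = cs.takeWhile p := by
  induction cs with
  | nil => simp
  | cons c rest ih =>
    by_cases h : p c = true <;>
      simp [h, ih]

theorem ab_eq (cs : List Char) :
    aLoop cs [] =
      PySem.List.slice cs (some ((bSkipIdx cs 0 : Nat) : Int))
        (some ((bTakeIdx cs (bSkipIdx cs 0) : Nat) : Int)) := by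
  rw [aLoop_nil, bSkipIdx_spec, bTakeIdx_spec]
  simp only [Nat.zero_add, List.drop_zero, Nat.cast_add, PySem.List.slice_natCast_add,
    drop_takeWhile_length, take_takeWhile_length]

-- ===== VERDICT (by name: the statement is the Claim_ definition above) =====
theorem get_first_alnum_word_spec : Claim_equal_get_first_alnum_word := by
  intro s _
  unfold Spec_get_first_alnum_word get_first_alnum_word get_first_alnum_word_alt
  exact congrArg String.ofList (ab_eq s.toList)
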